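-- pv_equiv track=rewrite | github.com/adlerosn/yas-pos-tagger | train.py | makeFrequencyTupleDict
-- ===== SOURCE A (Python) =====
-- def makeFrequencyTupleDict(tuples):
--     d = dict()
--     for t in tuples:
--         if t[0] not in d:
--             d[t[0]] = dict()
--         if t[1] not in d[t[0]]:
--             d[t[0]][t[1]] = 1
--         else:
--             d[t[0]][t[1]]+= 1
--     return d
-- ===== SOURCE B (Python) =====
-- def makeFrequencyTupleDict(tuples):
--     result = {}
--     for k in dict.fromkeys(t[0] for t in tuples):
--         inner = {}
--         for t in tuples:
--             if t[0] == k: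
--                 inner[t[1]] = inner.get(t[1], 0) + 1
--         result[k] = inner
--     return result
-- ===== Notes on version B (the rewrite author's own statement) =====
-- stated objective: alternative
-- what changed: A builds the nested dict in a single pass with in-place increments; B first dedups the outer keys, then makes a separate counting pass over the tuples for each outer key (group-by decomposition).
import Mathlib
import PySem

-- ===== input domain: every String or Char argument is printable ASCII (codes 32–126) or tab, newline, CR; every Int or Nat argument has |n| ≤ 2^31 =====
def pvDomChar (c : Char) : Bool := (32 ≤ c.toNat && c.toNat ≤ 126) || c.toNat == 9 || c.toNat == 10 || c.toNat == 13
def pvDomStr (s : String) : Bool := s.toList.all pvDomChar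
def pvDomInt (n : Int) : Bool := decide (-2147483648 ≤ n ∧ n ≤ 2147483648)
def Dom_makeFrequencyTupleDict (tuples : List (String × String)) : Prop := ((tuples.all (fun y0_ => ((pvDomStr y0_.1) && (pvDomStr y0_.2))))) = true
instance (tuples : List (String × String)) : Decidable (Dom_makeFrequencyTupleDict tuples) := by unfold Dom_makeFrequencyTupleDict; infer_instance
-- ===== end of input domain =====

-- B replaces A's single-pass nested-dict updating by a group-by decomposition (dedup the outer keys,
-- then one counting pass per outer key); objective: alternative (not faster).

-- ===== PORT A =====
-- the body of A's 'for t in tuples' loop, named so the lemmas can speak about it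
def pvStepA (d : PySem.Dict String (PySem.Dict String Int)) (t : String × String) :
    PySem.Dict String (PySem.Dict String Int) :=
  let d := if d.contains t.1 then d else d.insert t.1 PySem.Dict.empty   -- if t[0] not in d: d[t[0]] = {}
  let inner := d.getD t.1 PySem.Dict.empty                              -- d[t[0]]
  if inner.contains t.2 then
    d.insert t.1 (inner.insert t.2 (inner.getD t.2 0 + 1))              -- d[t[0]][t[1]] += 1
  else
    d.insert t.1 (inner.insert t.2 1)                                   -- d[t[0]][t[1]] = 1

def makeFrequencyTupleDict (tuples : List (String × String)) : List (String × List (String × Int)) :=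
  let d := tuples.foldl pvStepA PySem.Dict.empty
  (d.items.map (fun p => (p.1, p.2.items)))

-- ===== PORT B =====
-- 'inner' loop of B: count the second components among tuples whose first component is k
def pvInnerCount (tuples : List (String × String)) (k : String) : PySem.Dict String Int :=
  tuples.foldl
    (fun inner t => if t.1 == k then inner.insert t.2 (inner.getD t.2 0 + 1) else inner)
    PySem.Dict.empty

def makeFrequencyTupleDict_alt (tuples : List (String × String)) : List (String × List (String × Int)) :=
  let result :=
    (PySem.List.dedup (tuples.map (fun t => t.1))).foldl
      (fun r k => r.insert k (pvInnerCount tuples k)) PySem.Dict.empty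
  (result.items.map (fun p => (p.1, p.2.items)))

-- ===== PRECONDITION & SPEC =====
def Spec_makeFrequencyTupleDict (tuples : List (String × String)) (out : List (String × List (String × Int))) : Prop := out = makeFrequencyTupleDict_alt tuples
instance (tuples : List (String × String)) (out : List (String × List (String × Int))) : Decidable (Spec_makeFrequencyTupleDict tuples out) := by unfold Spec_makeFrequencyTupleDict; infer_instance

-- ===== CLAIM (what is proved, stated in full; the proofs are below) =====
def Claim_equal_makeFrequencyTupleDict : Prop := ∀ (tuples : List (String × String)), Dom_makeFrequencyTupleDict tuples → Spec_makeFrequencyTupleDict tuples (makeFrequencyTupleDict tuples)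

-- ===== LEMMAS AND PROOFS =====

-- the common closed form: outer keys in first-occurrence order, each mapped to the counter of its seconds
def pvShape (ts : List (String × String)) : List (String × PySem.Dict String Int) :=
  (PySem.Set.ofList (ts.map (fun t => t.1))).map
    (fun k => (k, PySem.Dict.counter ((ts.filter (fun t => t.1 == k)).map (fun t => t.2))))

lemma pvCounter_singleton (x : String) :
    PySem.Dict.counter [x] = PySem.Dict.empty.insert x 1 := rfl

lemma pvItemsA (ts : List (String × String)) :
    (ts.foldl pvStepA PySem.Dict.empty).items = pvShape ts := by
  induction ts using List.reverseRecOn with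
  | nil => rfl
  | append_singleton ts t ih =>
    rw [List.foldl_append, List.foldl_cons, List.foldl_nil]
    set d := ts.foldl pvStepA PySem.Dict.empty with hd
    have hkeys : d.keys = PySem.Set.ofList (ts.map (fun t => t.1)) := by
      simp only [PySem.Dict.keys, ih, pvShape, List.map_map, Function.comp_def]
      exact List.map_id _
    have hnd : d.keys.Nodup := by rw [hkeys]; exact PySem.Set.nodup_ofList _
    have hcont : d.contains t.1 = decide (t.1 ∈ PySem.Set.ofList (ts.map (fun t => t.1))) := by
      rw [PySem.Dict.contains_eq_decide_mem_keys, hkeys]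
    by_cases hmem : t.1 ∈ PySem.Set.ofList (ts.map (fun t => t.1))
    · -- t.1 is an existing outer key
      have hc : d.contains t.1 = true := by simp [hcont, hmem]
      have hitem : (t.1, PySem.Dict.counter ((ts.filter (fun t' => t'.1 == t.1)).map (fun t => t.2))) ∈ d.items := by
        rw [ih, pvShape]; exact List.mem_map_of_mem hmem
      have hinner : d.getD t.1 PySem.Dict.empty
          = PySem.Dict.counter ((ts.filter (fun t' => t'.1 == t.1)).map (fun t => t.2)) :=
        PySem.Dict.getD_of_mem_items _ hitem hnd PySem.Dict.empty
      set c := PySem.Dict.counter ((ts.filter (fun t' => t'.1 == t.1)).map (fun t => t.2)) with hcdef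
      have hbump : ∀ b : PySem.Dict String Int,
          (if b.contains t.2 then b.insert t.2 (b.getD t.2 0 + 1) else b.insert t.2 1)
          = b.modify t.2 0 (· + 1) := by
        intro b
        by_cases h2 : b.contains t.2 = true
        · simp only [h2, if_true]; rfl
        · have h2' : b.contains t.2 = false := by simpa using h2
          have hz : b.getD t.2 0 = 0 := PySem.Dict.getD_of_not_contains b 0 h2'
          simp only [h2', Bool.false_eq_true, if_false]
          show b.insert t.2 1 = b.insert t.2 (b.getD t.2 0 + 1)
          rw [hz]
          norm_num
      have hstep : pvStepA d t = d.insert t.1 (c.modify t.2 0 (· + 1)) := by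
        simp only [pvStepA, hc, if_true, hinner]
        rw [← apply_ite (d.insert t.1), hbump c]
      rw [hstep, PySem.Dict.items_insert_of_contains _ _ hc, ih]
      have hset : PySem.Set.ofList ((ts ++ [t]).map (fun t => t.1))
          = PySem.Set.ofList (ts.map (fun t => t.1)) := by
        rw [List.map_append, PySem.Set.ofList_eq_foldl, List.foldl_append]
        simp only [List.map_cons, List.map_nil, List.foldl_cons, List.foldl_nil]
        rw [← PySem.Set.ofList_eq_foldl]
        simp [PySem.Set.add, hmem]
      rw [pvShape, pvShape, hset, List.map_map]
      apply List.map_congr_left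
      intro k hk
      simp only [Function.comp_def]
      by_cases hkt : k = t.1
      · subst hkt
        simp only [beq_self_eq_true, if_true]
        rw [List.filter_append, List.map_append]
        simp only [List.filter_cons, List.filter_nil, beq_self_eq_true, if_true]
        rw [List.map_cons, List.map_nil, PySem.Dict.counter_append_singleton]
      · have : (k == t.1) = false := by simp [hkt]
        simp only [this, Bool.false_eq_true, if_false]
        rw [List.filter_append]
        simp only [List.filter_cons, List.filter_nil]
        have : (t.1 == k) = false := by simp [Ne.symm hkt]
        simp [this]
    · -- t.1 is a fresh outer key
      have hc : d.contains t.1 = false := by simp [hcont, hmem]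
      have hnotmem : t.1 ∉ ts.map (fun t => t.1) := by
        intro h; exact hmem (by simpa using (PySem.Set.mem_ofList _ _).mpr h)
      have hg : (d.insert t.1 PySem.Dict.empty).getD t.1 PySem.Dict.empty = PySem.Dict.empty :=
        PySem.Dict.getD_insert_self d t.1 PySem.Dict.empty PySem.Dict.empty
      have hstep : pvStepA d t = d.insert t.1 (PySem.Dict.empty.insert t.2 1) := by
        simp only [pvStepA, hc, Bool.false_eq_true, if_false, hg, PySem.Dict.contains_empty,
          PySem.Dict.insert_insert_self]
      rw [hstep, PySem.Dict.items_insert_of_not_contains _ _ hc, ih]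
      have hset : PySem.Set.ofList ((ts ++ [t]).map (fun t => t.1))
          = PySem.Set.ofList (ts.map (fun t => t.1)) ++ [t.1] := by
        rw [List.map_append, PySem.Set.ofList_eq_foldl, List.foldl_append]
        simp only [List.map_cons, List.map_nil, List.foldl_cons, List.foldl_nil]
        rw [← PySem.Set.ofList_eq_foldl]
        simp [PySem.Set.add, hmem]
      rw [pvShape, pvShape, hset, List.map_append, List.map_cons, List.map_nil]
      congr 1
      · apply List.map_congr_left
        intro k hk
        have hkt : k ≠ t.1 := by rintro rfl; exact hmem hk
        rw [List.filter_append]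
        simp only [List.filter_cons, List.filter_nil]
        have : (t.1 == k) = false := by simp [Ne.symm hkt]
        simp [this]
      · have hfil : ts.filter (fun t' => t'.1 == t.1) = [] := by
          rw [List.filter_eq_nil_iff]
          intro a ha hb
          exact hnotmem (by
            have : a.1 = t.1 := by simpa using hb
            rw [← this]; exact List.mem_map_of_mem ha)
        rw [List.filter_append, hfil]
        simp only [List.nil_append, List.filter_cons, List.filter_nil, beq_self_eq_true, if_true,
          List.map_cons, List.map_nil]
        rw [pvCounter_singleton]

lemma pvInnerCount_eq_counter (ts : List (String × String)) (k : String) :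
    pvInnerCount ts k
      = PySem.Dict.counter ((ts.filter (fun t => t.1 == k)).map (fun t => t.2)) := by
  rw [pvInnerCount, PySem.List.foldl_if_eq_foldl_filter,
    ← PySem.Dict.foldl_insert_getD_add_one_eq_counter, List.foldl_map]

lemma pvItemsB (ts : List (String × String)) :
    ((PySem.List.dedup (ts.map (fun t => t.1))).foldl
        (fun r k => r.insert k (pvInnerCount ts k)) PySem.Dict.empty).items
      = pvShape ts := by
  rw [PySem.List.dedup_eq_ofList]
  have h := PySem.Dict.items_foldl_insert_fresh (k := fun x => x)
    (v := fun k => pvInnerCount ts k) (d := PySem.Dict.empty)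
    (l := PySem.Set.ofList (ts.map (fun t => t.1)))
    (fun a _ => PySem.Dict.contains_empty a)
    (by simp [PySem.Set.nodup_ofList])
  refine h.trans ?_
  have he : (PySem.Dict.empty : PySem.Dict String (PySem.Dict String Int)).items = [] := rfl
  rw [he, List.nil_append]
  simp only [pvShape]
  apply List.map_congr_left
  intro k _
  simp only [pvInnerCount_eq_counter]

-- ===== VERDICT (by name: the statement is the Claim_ definition above) =====
theorem makeFrequencyTupleDict_spec : Claim_equal_makeFrequencyTupleDict := by
  intro tuples _
  show makeFrequencyTupleDict tuples = makeFrequencyTupleDict_alt tuples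
  simp only [makeFrequencyTupleDict, makeFrequencyTupleDict_alt]
  rw [pvItemsA, pvItemsB]
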